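-- pv_equiv track=rewrite | github.com/ChrisDelf/Tree_and_Graphs | Random_Code_Challenges/differentSymbolsNaive.py | differentSymbolsNaive
-- ===== SOURCE A (Python) =====
-- def differentSymbolsNaive(s):
--     ## going to use a dictionary for this one
--     differentL = {}
--     for letter in s:
--         if letter not in differentL:
--             differentL[letter] = 0
--     if len(differentL) > 0:
--         return len(differentL)
--     else:
--         return 0
-- ===== SOURCE B (Python) =====
-- def differentSymbolsNaive(s):
--     count = 0
--     prev = None
--     for c in sorted(s):
--         if c != prev:
--             count += 1
--             prev = c
--     return count
-- ===== Notes on version B (the rewrite author's own statement) =====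
-- stated objective: alternative
-- what changed: Replaces A's dict-based membership counting with a sort-then-scan: B sorts the characters and counts positions that differ from the previous one.
import Mathlib
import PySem

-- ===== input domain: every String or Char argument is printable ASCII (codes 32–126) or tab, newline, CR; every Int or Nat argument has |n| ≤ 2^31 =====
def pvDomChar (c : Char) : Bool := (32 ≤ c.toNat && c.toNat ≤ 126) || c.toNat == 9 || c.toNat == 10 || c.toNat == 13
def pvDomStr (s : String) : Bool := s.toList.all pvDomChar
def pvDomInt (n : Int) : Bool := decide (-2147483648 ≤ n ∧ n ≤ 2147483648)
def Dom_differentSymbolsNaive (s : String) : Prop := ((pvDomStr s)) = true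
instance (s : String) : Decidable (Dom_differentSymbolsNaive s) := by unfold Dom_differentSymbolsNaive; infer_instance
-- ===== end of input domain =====

-- B replaces A's dict-membership counting with a sort-then-count-adjacent-runs scan; same result, proved equal.

-- ===== PORT A =====
def differentSymbolsNaive (s : String) : Int :=
  let d : PySem.Dict Char Int :=
    s.toList.foldl
      (fun d letter => if d.contains letter then d else d.insert letter 0)
      PySem.Dict.empty
  if d.size > 0 then (d.size : Int) else 0

-- ===== PORT B =====
def differentSymbolsNaive_alt (s : String) : Int :=
  let st : Int × Option Char :=
    (PySem.List.sorted s.toList (fun c => c) false).foldl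
      (fun st c => if some c ≠ st.2 then (st.1 + 1, some c) else st)
      (0, none)
  st.1

-- ===== PRECONDITION & SPEC =====
def Spec_differentSymbolsNaive (s : String) (out : Int) : Prop := out = differentSymbolsNaive_alt s
instance (s : String) (out : Int) : Decidable (Spec_differentSymbolsNaive s out) := by unfold Spec_differentSymbolsNaive; infer_instance

-- ===== CLAIM (what is proved, stated in full; the proofs are below) =====
def Claim_equal_differentSymbolsNaive : Prop := ∀ (s : String), Dom_differentSymbolsNaive s → Spec_differentSymbolsNaive s (differentSymbolsNaive s)

-- ===== LEMMAS AND PROOFS =====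

-- A's loop: the dict's key list is the distinct characters in first-occurrence order
theorem aFold_keys (l : List Char) (d : PySem.Dict Char Int) :
    (l.foldl (fun d c => if d.contains c then d else d.insert c 0) d).keys
      = PySem.Set.update d.keys l := by
  induction l generalizing d with
  | nil => rfl
  | cons a t ih =>
    have hstep : (if d.contains a then d else d.insert a 0).keys = PySem.Set.add d.keys a := by
      by_cases h : d.contains a = true
      · simp [h, PySem.Set.add, PySem.Set.contains, List.contains_eq_mem,
          (PySem.Dict.contains_iff_mem_keys d a).mp h]
      · have hb : d.contains a = false := by simpa using h
        have hmem : a ∉ d.keys := fun hm => h ((PySem.Dict.contains_iff_mem_keys d a).mpr hm)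
        simp [hb, PySem.Dict.keys_insert_of_not_contains (h := hb),
          PySem.Set.add, PySem.Set.contains, List.contains_eq_mem, hmem]
    rw [List.foldl_cons, ih]
    simp [PySem.Set.update, hstep]

-- A returns the number of distinct characters
theorem a_eq_card (s : String) :
    differentSymbolsNaive s = (s.toList.toFinset.card : Int) := by
  have hkeys :
      (s.toList.foldl (fun d c => if d.contains c then d else d.insert c 0)
        (PySem.Dict.empty : PySem.Dict Char Int)).keys
        = PySem.Set.ofList s.toList := by
    rw [aFold_keys]; rfl
  have hnd : (PySem.Set.ofList s.toList).Nodup := PySem.Set.nodup_ofList s.toList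
  have hfin : (PySem.Set.ofList s.toList).toFinset = s.toList.toFinset := by
    ext c; simp [PySem.Set.mem_ofList]
  have hlen : (PySem.Set.ofList s.toList).length = s.toList.toFinset.card := by
    rw [← hfin]; exact (List.toFinset_card_of_nodup hnd).symm
  unfold differentSymbolsNaive
  have hsize :
      (s.toList.foldl (fun d c => if d.contains c then d else d.insert c 0)
        (PySem.Dict.empty : PySem.Dict Char Int)).size
        = s.toList.toFinset.card := by
    have := congrArg List.length hkeys
    simpa [PySem.Dict.keys, PySem.Dict.size, hlen] using this
  simp only [hsize]
  split <;> omega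

-- B's scan over a sorted tail whose previous character p is ≤ every element
theorem runAux_some (l : List Char) (hs : l.Pairwise (· ≤ ·)) (p : Char)
    (hp : ∀ x ∈ l, p ≤ x) (n : Int) :
    (l.foldl (fun st c => if some c ≠ st.2 then (st.1 + 1, some c) else st)
      (n, some p)).1 = n + ((l.toFinset.erase p).card : Int) := by
  induction l generalizing p n with
  | nil => simp
  | cons a t ih =>
    have hpa : p ≤ a := hp a (by simp)
    have hta : ∀ x ∈ t, a ≤ x := fun x hx => (List.pairwise_cons.mp hs).1 x hx
    have hts : t.Pairwise (· ≤ ·) := (List.pairwise_cons.mp hs).2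
    rw [List.foldl_cons]
    by_cases hap : a = p
    · subst hap
      rw [if_neg (by simp)]
      rw [ih hts a hta n, List.toFinset_cons, Finset.erase_insert_eq_erase]
    · have hlt : p < a := lt_of_le_of_ne hpa (Ne.symm hap)
      rw [if_pos (by simp [hap])]
      have h2 : ((((n, some p) : Int × Option Char).1 + 1, some a) : Int × Option Char)
          = (n + 1, some a) := rfl
      rw [h2, ih hts a hta (n + 1)]
      have hpt : p ∉ t := fun hm => absurd (hta p hm) (not_le.mpr hlt)
      have hpn : p ∉ (a :: t).toFinset := by
        simp only [List.toFinset_cons, Finset.mem_insert, List.mem_toFinset]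
        rintro (h | h)
        · exact hap h.symm
        · exact hpt h
      rw [Finset.erase_eq_of_notMem hpn, List.toFinset_cons,
        ← Finset.insert_erase (Finset.mem_insert_self a t.toFinset),
        Finset.erase_insert_eq_erase,
        Finset.card_insert_of_notMem (Finset.notMem_erase a t.toFinset)]
      push_cast
      ring

-- B returns the number of distinct characters
theorem b_eq_card (s : String) :
    differentSymbolsNaive_alt s = (s.toList.toFinset.card : Int) := by
  unfold differentSymbolsNaive_alt
  have hperm : (PySem.List.sorted s.toList (fun c => c) false).Perm s.toList :=
    PySem.List.sorted_perm s.toList (fun c => c) false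
  have hfin := List.toFinset_eq_of_perm _ _ hperm
  have hpw : (PySem.List.sorted s.toList (fun c => c) false).Pairwise (· ≤ ·) :=
    PySem.List.sorted_pairwise s.toList (fun c => c)
  rw [← hfin]
  cases hsort : PySem.List.sorted s.toList (fun c => c) false with
  | nil => simp
  | cons a t =>
    rw [hsort] at hpw
    have hta : ∀ x ∈ t, a ≤ x := fun x hx => (List.pairwise_cons.mp hpw).1 x hx
    have hts : t.Pairwise (· ≤ ·) := (List.pairwise_cons.mp hpw).2
    rw [List.foldl_cons, if_pos (by simp)]
    have h1 : ((((0 : Int), (none : Option Char)).1 + 1, some a) : Int × Option Char)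
        = (1, some a) := rfl
    rw [h1, runAux_some t hts a hta 1]
    have hat : a ∉ t.toFinset.erase a := Finset.notMem_erase a t.toFinset
    rw [List.toFinset_cons, ← Finset.insert_erase (Finset.mem_insert_self a t.toFinset),
      Finset.erase_insert_eq_erase, Finset.card_insert_of_notMem hat]
    push_cast
    ring

-- ===== VERDICT (by name: the statement is the Claim_ definition above) =====
theorem differentSymbolsNaive_spec : Claim_equal_differentSymbolsNaive := by
  intro s _
  unfold Spec_differentSymbolsNaive
  rw [a_eq_card, b_eq_card]
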